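-- pv_equiv track=rewrite | github.com/baihaqi2193/daspro | compsci.py | SumListExceptX
-- ===== SOURCE A (Python) =====
-- def IsEmpty(L):
--     if L == []:
--         return True
--     else:
--         return False
--
-- def Tail(L):
--     if not(IsEmpty(L)):
--         return L[1:]
--
-- def FirstElmt(L):
--     return L[0]
--
-- def SumListExceptX(x, L):
--     if L == []:
--         return 0
--     else:
--         if x == FirstElmt(L):
--             return 0 + SumListExceptX(x, Tail(L))
--         else:
--             return FirstElmt(L) + SumListExceptX(x, Tail(L))
-- ===== SOURCE B (Python) =====
-- def SumListExceptX(x, L):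
--     total = 0
--     for e in L:
--         if e != x:
--             total += e
--     return total
-- ===== Notes on version B (the rewrite author's own statement) =====
-- stated objective: faster
-- what changed: Replaced the helper-based structural recursion (IsEmpty/Tail/FirstElmt with L[1:] slicing each step) with a single explicit loop accumulating the sum of elements different from x.
import Mathlib
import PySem

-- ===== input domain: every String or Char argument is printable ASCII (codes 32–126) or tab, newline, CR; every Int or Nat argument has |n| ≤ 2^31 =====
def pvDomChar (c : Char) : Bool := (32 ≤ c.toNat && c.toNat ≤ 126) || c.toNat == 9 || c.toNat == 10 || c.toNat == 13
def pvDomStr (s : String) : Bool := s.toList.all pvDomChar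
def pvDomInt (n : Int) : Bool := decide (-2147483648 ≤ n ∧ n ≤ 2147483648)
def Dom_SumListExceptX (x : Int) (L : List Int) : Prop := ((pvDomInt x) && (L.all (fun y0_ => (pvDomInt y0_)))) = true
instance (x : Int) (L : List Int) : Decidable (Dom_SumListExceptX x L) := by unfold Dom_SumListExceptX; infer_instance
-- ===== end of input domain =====

-- B replaces A's helper-based structural recursion by a plain loop with an accumulator (simpler, O(1) space).

-- ===== PORT A =====
def pvIsEmpty (L : List Int) : Bool :=
  if L = [] then true else false

-- Tail returns None when L is empty (Python returns None); modelled with Option.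
def pvTail (L : List Int) : Option (List Int) :=
  if ¬ (pvIsEmpty L) then some (PySem.List.slice L (some 1) none) else none

-- FirstElmt L = L[0]; raises IndexError on []. A only calls it on nonempty lists.
def pvFirstElmt (L : List Int) : Option Int :=
  PySem.List.pyGet? L 0

def SumListExceptX (x : Int) (L : List Int) : Int :=
  if L = [] then 0
  else
    -- L nonempty here, so pvFirstElmt L and pvTail L are both `some`; .getD unwraps them exactly
    let h := (pvFirstElmt L).getD 0
    let t := (pvTail L).getD []
    if x = h then 0 + SumListExceptX x t
    else h + SumListExceptX x t
termination_by L.length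
decreasing_by
  all_goals
    cases L with
    | nil => simp_all
    | cons a as =>
      simp [pvTail, pvIsEmpty, PySem.List.slice_from_one]

-- ===== PORT B =====
def SumListExceptX_alt (x : Int) (L : List Int) : Int :=
  L.foldl (fun total e => if e ≠ x then total + e else total) 0

-- ===== PRECONDITION & SPEC =====
def Spec_SumListExceptX (x : Int) (L : List Int) (out : Int) : Prop := out = SumListExceptX_alt x L
instance (x : Int) (L : List Int) (out : Int) : Decidable (Spec_SumListExceptX x L out) := by unfold Spec_SumListExceptX; infer_instance

-- ===== CLAIM (what is proved, stated in full; the proofs are below) =====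
def Claim_equal_SumListExceptX : Prop := ∀ (x : Int) (L : List Int), Dom_SumListExceptX x L → Spec_SumListExceptX x L (SumListExceptX x L)

-- ===== LEMMAS AND PROOFS =====

theorem alt_acc (x : Int) (L : List Int) (acc : Int) :
    L.foldl (fun total e => if e ≠ x then total + e else total) acc
      = acc + L.foldl (fun total e => if e ≠ x then total + e else total) 0 := by
  induction L generalizing acc with
  | nil => simp
  | cons a as ih =>
    simp only [List.foldl_cons]
    rw [ih, ih (if a ≠ x then 0 + a else 0)]
    split_ifs <;> ring

theorem A_eq_B (x : Int) (L : List Int) : SumListExceptX x L = SumListExceptX_alt x L := by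
  induction L with
  | nil => simp [SumListExceptX, SumListExceptX_alt]
  | cons a as ih =>
    rw [SumListExceptX]
    simp only [reduceCtorEq, if_neg, not_false_iff]
    have htail : pvTail (a :: as) = some as := by
      simp [pvTail, pvIsEmpty, PySem.List.slice_from_one]
    have hfirst : pvFirstElmt (a :: as) = some a := by
      simp [pvFirstElmt, PySem.List.pyGet?, PySem.List.pyIdx?]
    rw [hfirst, htail]
    simp only [Option.getD_some]
    simp only [SumListExceptX_alt, List.foldl_cons] at *
    rw [alt_acc x as (if a ≠ x then 0 + a else 0)]
    split_ifs with h1 h2 <;> simp_all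

-- ===== VERDICT (by name: the statement is the Claim_ definition above) =====
theorem SumListExceptX_spec : Claim_equal_SumListExceptX := by
  intro x L _
  unfold Spec_SumListExceptX
  exact A_eq_B x L
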